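-- pv_equiv track=rewrite | github.com/mwouts/jupytext | jupytext/formats.py | update_formats
-- ===== SOURCE A (Python) =====
-- def update_formats(formats, ext, format_name):
--     """Update the format list with the given format name"""
--     updated_formats = []
--     found_ext = False
--     for org_ext, org_format_name in formats:
--         if org_ext != ext:
--             updated_formats.append((org_ext, org_format_name))
--         elif not found_ext:
--             updated_formats.append((ext, format_name))
--             found_ext = True
--
--     return updated_formats
-- ===== SOURCE B (Python) =====
-- def update_formats(formats, ext, format_name):
--     """Update the format list with the given format name"""
--     updated = [(e, n) for e, n in formats if e != ext]
--     for idx, (e, _n) in enumerate(formats):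
--         if e == ext:
--             updated.insert(idx, (ext, format_name))
--             break
--     return updated
-- ===== Notes on version B (the rewrite author's own statement) =====
-- stated objective: alternative
-- what changed: Replaces the single pass carrying a found-flag by a filter pass that drops all matching-ext entries followed by a scan for the index of the first match, where the replacement is inserted.
import Mathlib
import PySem

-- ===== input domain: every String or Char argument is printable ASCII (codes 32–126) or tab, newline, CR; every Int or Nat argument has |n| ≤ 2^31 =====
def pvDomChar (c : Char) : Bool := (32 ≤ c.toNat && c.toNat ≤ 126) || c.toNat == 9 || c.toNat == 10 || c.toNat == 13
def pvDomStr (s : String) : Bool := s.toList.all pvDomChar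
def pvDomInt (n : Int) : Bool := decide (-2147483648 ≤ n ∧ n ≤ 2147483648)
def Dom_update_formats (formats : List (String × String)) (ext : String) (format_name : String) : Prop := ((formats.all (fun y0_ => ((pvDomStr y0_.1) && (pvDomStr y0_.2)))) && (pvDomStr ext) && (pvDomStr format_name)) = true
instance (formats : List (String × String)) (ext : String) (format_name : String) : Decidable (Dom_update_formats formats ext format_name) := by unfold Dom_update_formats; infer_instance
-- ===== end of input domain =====

-- B replaces A's single pass with a found-flag by a filter pass plus a first-match-index scan with one insert (alternative decomposition, same cost).

-- ===== PORT A =====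
-- the for-loop of A, carrying (updated_formats, found_ext)
def pvGoA (ext format_name : String) : List (String × String) → List (String × String) → Bool → List (String × String)
  | [], acc, _ => acc
  | (org_ext, org_format_name) :: rest, acc, found =>
    if org_ext ≠ ext then pvGoA ext format_name rest (acc ++ [(org_ext, org_format_name)]) found
    else if !found then pvGoA ext format_name rest (acc ++ [(ext, format_name)]) true
    else pvGoA ext format_name rest acc found

def update_formats (formats : List (String × String)) (ext : String) (format_name : String) : List (String × String) :=
  pvGoA ext format_name formats [] false

-- ===== PORT B =====
-- the 'for idx, (e, _n) in enumerate(formats): if e == ext: … break' loop of B, carrying idx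
def pvFirstIdx (ext : String) : List (String × String) → Nat → Option Nat
  | [], _ => none
  | (e, _) :: rest, idx => if e = ext then some idx else pvFirstIdx ext rest (idx + 1)

def update_formats_alt (formats : List (String × String)) (ext : String) (format_name : String) : List (String × String) :=
  let updated := formats.filter (fun p => p.1 ≠ ext)
  match pvFirstIdx ext formats 0 with
  | none => updated
  | some idx => PySem.List.insert updated (idx : Int) (ext, format_name)

-- ===== PRECONDITION & SPEC =====
def Spec_update_formats (formats : List (String × String)) (ext : String) (format_name : String) (out : List (String × String)) : Prop := out = update_formats_alt formats ext format_name
instance (formats : List (String × String)) (ext : String) (format_name : String) (out : List (String × String)) : Decidable (Spec_update_formats formats ext format_name out) := by unfold Spec_update_formats; infer_instance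

-- ===== CLAIM (what is proved, stated in full; the proofs are below) =====
def Claim_equal_update_formats : Prop := ∀ (formats : List (String × String)) (ext : String) (format_name : String), Dom_update_formats formats ext format_name → Spec_update_formats formats ext format_name (update_formats formats ext format_name)

-- ===== LEMMAS AND PROOFS =====

theorem pvGoA_acc (ext fn : String) (l : List (String × String)) :
    ∀ (acc : List (String × String)) (found : Bool),
      pvGoA ext fn l acc found = acc ++ pvGoA ext fn l [] found := by
  induction l with
  | nil => intro acc found; simp [pvGoA]
  | cons hd tl ih =>
    intro acc found
    obtain ⟨e, n⟩ := hd
    simp only [pvGoA]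
    by_cases h : e = ext
    · simp only [h, ne_eq, not_true_eq_false, if_false]
      cases found
      · simp only [Bool.not_false, if_true]
        rw [ih (acc ++ [(ext, fn)]), List.nil_append, ih [(ext, fn)]]
        simp
      · simp only [Bool.not_true]
        exact ih acc true
    · simp only [ne_eq, h, not_false_eq_true, if_true]
      rw [ih (acc ++ [(e, n)]), List.nil_append, ih [(e, n)]]
      simp

theorem pvGoA_true (ext fn : String) (l : List (String × String)) :
    pvGoA ext fn l [] true = l.filter (fun p => p.1 ≠ ext) := by
  induction l with
  | nil => simp [pvGoA]
  | cons hd tl ih =>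
    obtain ⟨e, n⟩ := hd
    by_cases h : e = ext
    · subst h; simpa [pvGoA] using ih
    · simp [pvGoA, h]
      rw [pvGoA_acc]
      simp [ih]

theorem pvFirstIdx_shift (ext : String) (l : List (String × String)) :
    ∀ i, pvFirstIdx ext l (i + 1) = (pvFirstIdx ext l i).map (· + 1) := by
  induction l with
  | nil => intro i; simp [pvFirstIdx]
  | cons hd tl ih =>
    intro i
    obtain ⟨e, n⟩ := hd
    by_cases h : e = ext <;> simp [pvFirstIdx, h, ih]

theorem pvFirstIdx_le_filter (ext : String) (l : List (String × String)) :
    ∀ i, pvFirstIdx ext l 0 = some i → i ≤ (l.filter (fun p => p.1 ≠ ext)).length := by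
  induction l with
  | nil => intro i h; simp [pvFirstIdx] at h
  | cons hd tl ih =>
    intro i h
    obtain ⟨e, n⟩ := hd
    by_cases he : e = ext
    · simp [pvFirstIdx, he] at h
      omega
    · simp only [pvFirstIdx, if_neg he] at h
      rw [pvFirstIdx_shift] at h
      cases hj : pvFirstIdx ext tl 0 with
      | none => simp [hj] at h
      | some j =>
        simp [hj] at h
        have := ih j hj
        simp [he, decide_not] at *
        omega

theorem main_eq (ext fn : String) (l : List (String × String)) :
    pvGoA ext fn l [] false = update_formats_alt l ext fn := by
  induction l with
  | nil => simp [pvGoA, update_formats_alt, pvFirstIdx]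
  | cons hd tl ih =>
    obtain ⟨e, n⟩ := hd
    by_cases h : e = ext
    · subst h
      simp only [pvGoA, ne_eq, not_true_eq_false, if_false, Bool.not_false, if_true]
      rw [pvGoA_acc, pvGoA_true]
      simp [update_formats_alt, pvFirstIdx, PySem.List.insert_zero]
    · simp only [pvGoA, ne_eq, h, not_false_eq_true, if_true]
      rw [pvGoA_acc, ih]
      simp only [update_formats_alt, pvFirstIdx, if_neg h]
      rw [pvFirstIdx_shift]
      cases hj : pvFirstIdx ext tl 0 with
      | none => simp [h]
      | some j =>
        have hle := pvFirstIdx_le_filter ext tl j hj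
        simp only [Option.map_some]
        have h1 : PySem.List.insert (tl.filter (fun p => p.1 ≠ ext)) (j : Int) (ext, fn)
            = (tl.filter (fun p => p.1 ≠ ext)).take j ++ (ext, fn) :: (tl.filter (fun p => p.1 ≠ ext)).drop j :=
          PySem.List.insert_natCast _ _ _ hle
        have h2 : PySem.List.insert (((e, n) :: tl).filter (fun p => p.1 ≠ ext)) ((j + 1 : Nat) : Int) (ext, fn)
            = (((e, n) :: tl).filter (fun p => p.1 ≠ ext)).take (j + 1) ++ (ext, fn) :: (((e, n) :: tl).filter (fun p => p.1 ≠ ext)).drop (j + 1) := by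
          apply PySem.List.insert_natCast
          simp [h, decide_not] at *
          omega
        rw [h1, h2]
        simp [h]

-- ===== VERDICT (by name: the statement is the Claim_ definition above) =====
theorem update_formats_spec : Claim_equal_update_formats := by
  intro formats ext format_name _
  unfold Spec_update_formats update_formats
  exact main_eq ext format_name formats
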